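-- pv_equiv track=rewrite | github.com/pypi-data/pypi-mirror-401 | packages/atloop/atloop-0.1.0.tar.gz/atloop-0.1.0/atloop/tools/interaction/todo_write.py | _generate_todo_markdown
-- ===== SOURCE A (Python) =====
-- from typing import Any, Dict, List, Optional
--
-- def _generate_todo_markdown(todos: List[Dict[str, Any]]) -> str:
--     """Generate markdown TODO format."""
--     lines = ["# TODO\n", ""]
--
--     # Group by status
--     pending = [t for t in todos if t["status"] == "pending"]
--     in_progress = [t for t in todos if t["status"] == "in_progress"]
--     completed = [t for t in todos if t["status"] == "completed"]
--
--     if in_progress: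
--         lines.append("## In Progress\n")
--         for todo in in_progress:
--             lines.append(f"- [ ] {todo['content']} ({todo['activeForm']})")
--         lines.append("")
--
--     if pending:
--         lines.append("## Pending\n")
--         for todo in pending:
--             lines.append(f"- [ ] {todo['content']} ({todo['activeForm']})")
--         lines.append("")
--
--     if completed:
--         lines.append("## Completed\n")
--         for todo in completed:
--             lines.append(f"- [x] {todo['content']}")
--         lines.append("")
--
--     return "\n".join(lines)
-- ===== SOURCE B (Python) =====
-- def _generate_todo_markdown(todos):
--     """Generate markdown TODO format via stable sort by section rank + one scan
--     that emits a header whenever the rank changes."""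
--     rank = {"in_progress": 0, "pending": 1, "completed": 2}
--     ordered = sorted((t for t in todos if t["status"] in rank),
--                      key=lambda t: rank[t["status"]])
--     headers = ["## In Progress\n", "## Pending\n", "## Completed\n"]
--     lines = ["# TODO\n", ""]
--     prev = None
--     for t in ordered:
--         r = rank[t["status"]]
--         if r != prev:
--             if prev is not None:
--                 lines.append("")
--             lines.append(headers[r])
--             prev = r
--         lines.append("- [x] " + t["content"] if r == 2
--                      else "- [ ] {} ({})".format(t["content"], t["activeForm"]))
--     if prev is not None:
--         lines.append("")
--     return "\n".join(lines)
-- ===== Notes on version B (the rewrite author's own statement) =====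
-- stated objective: alternative
-- what changed: Replaces the three separate filter passes and three copy-pasted section blocks by a stable sort on a section rank followed by a single scan that emits a section header whenever the rank changes.
import Mathlib
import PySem

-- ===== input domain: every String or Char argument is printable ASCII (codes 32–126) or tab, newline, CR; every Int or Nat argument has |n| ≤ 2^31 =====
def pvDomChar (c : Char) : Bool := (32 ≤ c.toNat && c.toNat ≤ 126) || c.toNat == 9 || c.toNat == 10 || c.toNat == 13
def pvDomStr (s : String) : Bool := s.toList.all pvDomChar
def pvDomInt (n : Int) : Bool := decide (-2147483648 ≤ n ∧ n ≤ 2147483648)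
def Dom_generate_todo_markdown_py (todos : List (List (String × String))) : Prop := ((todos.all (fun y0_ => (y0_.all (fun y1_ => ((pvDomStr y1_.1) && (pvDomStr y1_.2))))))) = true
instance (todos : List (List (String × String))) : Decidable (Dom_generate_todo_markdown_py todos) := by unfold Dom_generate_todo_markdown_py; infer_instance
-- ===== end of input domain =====

-- ===== PORT A =====
-- B replaces A's three filter passes and three copy-pasted section blocks by a stable sort on a
-- section rank followed by one scan that emits a header whenever the rank changes; objective: alternative.
-- t[k] on an assoc-list dict: first match; default "" is never reached inside Pre_.
def pvGet (t : List (String × String)) (k : String) : String :=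
  ((t.find? (fun p => p.1 == k)).map (·.2)).getD ""

-- f"- [ ] {t['content']} ({t['activeForm']})"
def pvFmtOpen (t : List (String × String)) : String :=
  "- [ ] " ++ pvGet t "content" ++ " (" ++ pvGet t "activeForm" ++ ")"

-- "- [x] " + t["content"]
def pvFmtDone (t : List (String × String)) : String :=
  "- [x] " ++ pvGet t "content"

def generate_todo_markdown_py (todos : List (List (String × String))) : String :=
  let pending := todos.filter (fun t => pvGet t "status" == "pending")
  let in_progress := todos.filter (fun t => pvGet t "status" == "in_progress")
  let completed := todos.filter (fun t => pvGet t "status" == "completed")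
  let lines : List String := ["# TODO\n", ""]
  let lines := if in_progress.isEmpty then lines else
    lines ++ ["## In Progress\n"] ++ in_progress.map pvFmtOpen ++ [""]
  let lines := if pending.isEmpty then lines else
    lines ++ ["## Pending\n"] ++ pending.map pvFmtOpen ++ [""]
  let lines := if completed.isEmpty then lines else
    lines ++ ["## Completed\n"] ++ completed.map pvFmtDone ++ [""]
  PySem.Str.join "\n" lines

-- ===== PORT B =====
-- rank = {"in_progress": 0, "pending": 1, "completed": 2}
def pvRankDict : PySem.Dict String Int :=
  PySem.Dict.ofList [("in_progress", 0), ("pending", 1), ("completed", 2)]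

-- headers = ["## In Progress\n", "## Pending\n", "## Completed\n"]
def pvHeaders : List String := ["## In Progress\n", "## Pending\n", "## Completed\n"]

-- rank[t["status"]]; only evaluated on todos whose status is a key of rank, so the
-- .getD 0 default (KeyError in Python) is never reached where B calls it.
def pvRankOf (t : List (String × String)) : Int :=
  (PySem.Dict.get? pvRankDict (pvGet t "status")).getD 0

-- the body of B's 'for t in ordered' loop; state = (lines, prev)
def pvScanStep (st : List String × Option Int) (t : List (String × String)) :
    List String × Option Int :=
  let r := pvRankOf t
  let lines :=
    if st.2 ≠ some r then
      -- 'if prev is not None: lines.append("")' then 'lines.append(headers[r])'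
      -- (headers[r]: r is always 0/1/2 here, in range)
      (if st.2 = none then st.1 else st.1 ++ [""]) ++ [PySem.List.pyGetD pvHeaders r ""]
    else st.1
  (lines ++ [if r == 2 then pvFmtDone t else pvFmtOpen t], some r)

def generate_todo_markdown_py_alt (todos : List (List (String × String))) : String :=
  let ordered := PySem.List.sorted
    (todos.filter (fun t => (PySem.Dict.get? pvRankDict (pvGet t "status")).isSome))
    pvRankOf false
  let st := ordered.foldl pvScanStep (["# TODO\n", ""], none)
  let lines := if st.2 = none then st.1 else st.1 ++ [""]
  PySem.Str.join "\n" lines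

-- ===== PRECONDITION & SPEC =====
-- Pre_ excludes exactly the inputs where Python A raises KeyError: a todo without a "status" key,
-- or a pending/in_progress todo missing "content"/"activeForm", or a completed todo missing "content".
def Pre_generate_todo_markdown_py (todos : List (List (String × String))) : Prop :=
  ∀ t ∈ todos,
    (t.find? (fun p => p.1 == "status")).isSome ∧
    (pvGet t "status" = "pending" ∨ pvGet t "status" = "in_progress" →
      (t.find? (fun p => p.1 == "content")).isSome ∧ (t.find? (fun p => p.1 == "activeForm")).isSome) ∧
    (pvGet t "status" = "completed" → (t.find? (fun p => p.1 == "content")).isSome)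

instance (todos : List (List (String × String))) : Decidable (Pre_generate_todo_markdown_py todos) := by
  unfold Pre_generate_todo_markdown_py; infer_instance

def pvWitness_generate_todo_markdown_py : (List (List (String × String))) :=
  [[("status", "pending"), ("content", "a"), ("activeForm", "A")], [("status", "done?")]]

def Spec_generate_todo_markdown_py (todos : List (List (String × String))) (out : String) : Prop := out = generate_todo_markdown_py_alt todos
instance (todos : List (List (String × String))) (out : String) : Decidable (Spec_generate_todo_markdown_py todos out) := by unfold Spec_generate_todo_markdown_py; infer_instance

-- ===== CLAIM (what is proved, stated in full; the proofs are below) =====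
def Claim_equal_generate_todo_markdown_py : Prop := ∀ (todos : List (List (String × String))), Dom_generate_todo_markdown_py todos → Pre_generate_todo_markdown_py todos → Spec_generate_todo_markdown_py todos (generate_todo_markdown_py todos)

-- ===== LEMMAS AND PROOFS =====

-- the rank dict, as an if-chain on the key
theorem pv_rank_get (s : String) :
    PySem.Dict.get? pvRankDict s =
      (if s == "in_progress" then some 0 else if s == "pending" then some 1
       else if s == "completed" then some (2:Int) else none) := by
  have hmk : pvRankDict = PySem.Dict.mk [("in_progress", 0), ("pending", 1), ("completed", 2)] := by
    decide
  rw [hmk]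
  by_cases h0 : s = "in_progress" <;> by_cases h1 : s = "pending" <;>
    by_cases h2 : s = "completed" <;> simp_all [PySem.Dict.get?] <;>
      exact ⟨fun h => h0 h.symm, fun h => h1 h.symm, fun h => h2 h.symm⟩

-- insertBy skips a prefix it is not inserted before
theorem pv_insertBy_append {α : Type} (before : α → α → Bool) (x : α) (A B : List α)
    (h : ∀ y ∈ A, before x y = false) :
    PySem.List.insertBy before x (A ++ B) = A ++ PySem.List.insertBy before x B := by
  induction A with
  | nil => simp
  | cons a as ih =>
    have ha := h a (by simp)
    simp only [List.cons_append, PySem.List.insertBy, ha, Bool.false_eq_true, if_false,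
      List.cons.injEq, true_and]
    exact ih (fun y hy => h y (by simp [hy]))

-- a stable sort on a {0,1,2}-valued key is the three filters concatenated
theorem pv_sorted_ranks {α : Type} (key : α → Int) (xs : List α)
    (h : ∀ t ∈ xs, key t = 0 ∨ key t = 1 ∨ key t = 2) :
    PySem.List.sorted xs key false =
      xs.filter (fun t => key t == 0) ++ xs.filter (fun t => key t == 1)
        ++ xs.filter (fun t => key t == 2) := by
  induction xs using List.reverseRecOn with
  | nil => simp [PySem.List.sorted_eq_foldl_insertBy]
  | append_singleton xs x ih =>
    have hxs : ∀ t ∈ xs, key t = 0 ∨ key t = 1 ∨ key t = 2 :=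
      fun t ht => h t (by simp [ht])
    have hx := h x (by simp)
    have hstep : PySem.List.sorted (xs ++ [x]) key false =
        PySem.List.insertBy (fun a b => decide (key a < key b)) x
          (PySem.List.sorted xs key false) := by
      rw [PySem.List.sorted_eq_foldl_insertBy, List.foldl_append,
        ← PySem.List.sorted_eq_foldl_insertBy]
      rfl
    rw [hstep, ih hxs]
    have f0 : ∀ y ∈ xs.filter (fun t => key t == 0), key y = 0 := by
      intro y hy; simpa using (List.of_mem_filter hy)
    have f1 : ∀ y ∈ xs.filter (fun t => key t == 1), key y = 1 := by
      intro y hy; simpa using (List.of_mem_filter hy)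
    have f2 : ∀ y ∈ xs.filter (fun t => key t == 2), key y = 2 := by
      intro y hy; simpa using (List.of_mem_filter hy)
    rcases hx with hx | hx | hx
    · -- key x = 0 : not before any of F0, before everything in F1 ++ F2
      rw [List.append_assoc,
        pv_insertBy_append _ _ _ _ (fun y hy => by simp [f0 y hy, hx])]
      have hins : PySem.List.insertBy (fun a b => decide (key a < key b)) x
          (xs.filter (fun t => key t == 1) ++ xs.filter (fun t => key t == 2)) =
          x :: (xs.filter (fun t => key t == 1) ++ xs.filter (fun t => key t == 2)) := by
        cases hc : xs.filter (fun t => key t == 1) ++ xs.filter (fun t => key t == 2) with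
        | nil => simp [PySem.List.insertBy]
        | cons b bs =>
          have hb : b ∈ xs.filter (fun t => key t == 1) ++ xs.filter (fun t => key t == 2) := by
            simp [hc]
          have : key b = 1 ∨ key b = 2 := by
            rcases List.mem_append.1 hb with hb | hb
            · exact Or.inl (f1 b hb)
            · exact Or.inr (f2 b hb)
          have hlt : key x < key b := by omega
          simp [PySem.List.insertBy, hlt]
      rw [hins]
      simp [List.filter_append, hx]
    · -- key x = 1 : not before F0 ++ F1, before everything in F2
      rw [pv_insertBy_append _ _ _ _ (fun y hy => by
          rcases List.mem_append.1 hy with hy | hy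
          · simp [f0 y hy, hx]
          · simp [f1 y hy, hx])]
      have hins : PySem.List.insertBy (fun a b => decide (key a < key b)) x
          (xs.filter (fun t => key t == 2)) = x :: xs.filter (fun t => key t == 2) := by
        cases hc : xs.filter (fun t => key t == 2) with
        | nil => simp [PySem.List.insertBy]
        | cons b bs =>
          have hb : b ∈ xs.filter (fun t => key t == 2) := by simp [hc]
          have hlt : key x < key b := by have := f2 b hb; omega
          simp [PySem.List.insertBy, hlt]
      rw [hins]
      simp [List.filter_append, hx, List.append_assoc]
    · -- key x = 2 : not before anything, goes to the very end
      rw [PySem.List.insertBy_of_forall_not_before _ _ _ (fun y hy => by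
        rcases List.mem_append.1 hy with hy | hy
        · rcases List.mem_append.1 hy with hy | hy
          · simp [f0 y hy, hx]
          · simp [f1 y hy, hx]
        · simp [f2 y hy, hx])]
      simp [List.filter_append, hx, List.append_assoc]

-- scanning a block whose rank equals prev appends only the formatted lines
theorem pv_scan_same (r : Int) (bs : List (List (String × String)))
    (h : ∀ t ∈ bs, pvRankOf t = r) (lines : List String) :
    bs.foldl pvScanStep (lines, some r) =
      (lines ++ bs.map (fun t => if r == 2 then pvFmtDone t else pvFmtOpen t), some r) := by
  induction bs generalizing lines with
  | nil => simp
  | cons b bs ih =>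
    have hb := h b (by simp)
    have step : pvScanStep (lines, some r) b = (lines ++ [if r == 2 then pvFmtDone b else pvFmtOpen b], some r) := by
      simp [pvScanStep, hb]
    rw [List.foldl_cons, step, ih (fun t ht => h t (by simp [ht]))]
    simp

-- scanning a nonempty block of a new rank emits the separator, the header and the lines
theorem pv_scan_block (r : Int) (b : List (String × String)) (bs : List (List (String × String)))
    (h : ∀ t ∈ b :: bs, pvRankOf t = r) (lines : List String) (prev : Option Int)
    (hne : prev ≠ some r) :
    (b :: bs).foldl pvScanStep (lines, prev) =
      ((if prev = none then lines else lines ++ [""]) ++ [PySem.List.pyGetD pvHeaders r ""]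
        ++ (b :: bs).map (fun t => if r == 2 then pvFmtDone t else pvFmtOpen t), some r) := by
  have hb := h b (by simp)
  have step : pvScanStep (lines, prev) b =
      ((if prev = none then lines else lines ++ [""]) ++ [PySem.List.pyGetD pvHeaders r ""]
        ++ [if r == 2 then pvFmtDone b else pvFmtOpen b], some r) := by
    simp [pvScanStep, hb, hne]
  rw [List.foldl_cons, step, pv_scan_same r bs (fun t ht => h t (by simp [ht]))]
  simp

-- the kept-and-rank-i filter is A's status filter (pointwise on the status string)
theorem pv_pred0 (t : List (String × String)) :
    ((pvRankOf t == 0) && (PySem.Dict.get? pvRankDict (pvGet t "status")).isSome) =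
      (pvGet t "status" == "in_progress") := by
  simp only [pvRankOf, pv_rank_get]
  generalize pvGet t "status" = s
  by_cases h0 : s = "in_progress" <;> by_cases h1 : s = "pending" <;>
    by_cases h2 : s = "completed" <;> simp_all

theorem pv_pred1 (t : List (String × String)) :
    ((pvRankOf t == 1) && (PySem.Dict.get? pvRankDict (pvGet t "status")).isSome) =
      (pvGet t "status" == "pending") := by
  simp only [pvRankOf, pv_rank_get]
  generalize pvGet t "status" = s
  by_cases h0 : s = "in_progress" <;> by_cases h1 : s = "pending" <;>
    by_cases h2 : s = "completed" <;> simp_all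

theorem pv_pred2 (t : List (String × String)) :
    ((pvRankOf t == 2) && (PySem.Dict.get? pvRankDict (pvGet t "status")).isSome) =
      (pvGet t "status" == "completed") := by
  simp only [pvRankOf, pv_rank_get]
  generalize pvGet t "status" = s
  by_cases h0 : s = "in_progress" <;> by_cases h1 : s = "pending" <;>
    by_cases h2 : s = "completed" <;> simp_all

-- B's sorted kept list is A's three filters, in section order
theorem pv_ordered_eq (todos : List (List (String × String))) :
    PySem.List.sorted
        (todos.filter (fun t => (PySem.Dict.get? pvRankDict (pvGet t "status")).isSome))
        pvRankOf false =
      todos.filter (fun t => pvGet t "status" == "in_progress")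
        ++ todos.filter (fun t => pvGet t "status" == "pending")
        ++ todos.filter (fun t => pvGet t "status" == "completed") := by
  set kept := todos.filter (fun t => (PySem.Dict.get? pvRankDict (pvGet t "status")).isSome) with hk
  have hmem : ∀ t ∈ kept, pvRankOf t = 0 ∨ pvRankOf t = 1 ∨ pvRankOf t = 2 := by
    intro t ht
    have hs : (PySem.Dict.get? pvRankDict (pvGet t "status")).isSome := by
      simpa using List.of_mem_filter ht
    simp only [pvRankOf, pv_rank_get]
    rw [pv_rank_get] at hs
    generalize hg : pvGet t "status" = s at hs ⊢
    by_cases h0 : s = "in_progress" <;> by_cases h1 : s = "pending" <;>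
      by_cases h2 : s = "completed" <;> simp_all
  rw [pv_sorted_ranks pvRankOf kept hmem, hk]
  simp only [List.filter_filter]
  rw [List.filter_congr (fun t _ => pv_pred0 t), List.filter_congr (fun t _ => pv_pred1 t),
    List.filter_congr (fun t _ => pv_pred2 t)]

-- ranks of A's filtered elements
theorem pv_rank_of_mem0 (todos : List (List (String × String))) :
    ∀ t ∈ todos.filter (fun t => pvGet t "status" == "in_progress"), pvRankOf t = 0 := by
  intro t ht
  have := List.of_mem_filter ht
  simp only [beq_iff_eq] at this
  simp [pvRankOf, pv_rank_get, this]

theorem pv_rank_of_mem1 (todos : List (List (String × String))) :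
    ∀ t ∈ todos.filter (fun t => pvGet t "status" == "pending"), pvRankOf t = 1 := by
  intro t ht
  have := List.of_mem_filter ht
  simp only [beq_iff_eq] at this
  simp [pvRankOf, pv_rank_get, this]

theorem pv_rank_of_mem2 (todos : List (List (String × String))) :
    ∀ t ∈ todos.filter (fun t => pvGet t "status" == "completed"), pvRankOf t = 2 := by
  intro t ht
  have := List.of_mem_filter ht
  simp only [beq_iff_eq] at this
  simp [pvRankOf, pv_rank_get, this]

-- ===== VERDICT (by name: the statement is the Claim_ definition above) =====
theorem generate_todo_markdown_py_spec : Claim_equal_generate_todo_markdown_py := by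
  intro todos _ _
  unfold Spec_generate_todo_markdown_py generate_todo_markdown_py generate_todo_markdown_py_alt
  rw [pv_ordered_eq]
  have h0 := pv_rank_of_mem0 todos
  have h1 := pv_rank_of_mem1 todos
  have h2 := pv_rank_of_mem2 todos
  dsimp only
  generalize todos.filter (fun t => pvGet t "status" == "in_progress") = F0 at h0 ⊢
  generalize todos.filter (fun t => pvGet t "status" == "pending") = F1 at h1 ⊢
  generalize todos.filter (fun t => pvGet t "status" == "completed") = F2 at h2 ⊢
  simp only [List.foldl_append]
  cases F0 with
  | nil =>
    cases F1 with
    | nil =>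
      cases F2 with
      | nil => simp
      | cons b bs =>
        rw [List.foldl_nil, List.foldl_nil, pv_scan_block 2 b bs h2 _ none (by simp)]
        simp [PySem.List.pyGetD, PySem.List.pyGet?, PySem.List.pyIdx?, pvHeaders]
    | cons b1 bs1 =>
      rw [List.foldl_nil, pv_scan_block 1 b1 bs1 h1 _ none (by simp)]
      cases F2 with
      | nil =>
        simp [PySem.List.pyGetD, PySem.List.pyGet?, PySem.List.pyIdx?, pvHeaders]
      | cons b2 bs2 =>
        rw [pv_scan_block 2 b2 bs2 h2 _ (some 1) (by simp)]
        simp [PySem.List.pyGetD, PySem.List.pyGet?, PySem.List.pyIdx?, pvHeaders]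
  | cons b0 bs0 =>
    rw [pv_scan_block 0 b0 bs0 h0 _ none (by simp)]
    cases F1 with
    | nil =>
      rw [List.foldl_nil]
      cases F2 with
      | nil =>
        simp [PySem.List.pyGetD, PySem.List.pyGet?, PySem.List.pyIdx?, pvHeaders]
      | cons b2 bs2 =>
        rw [pv_scan_block 2 b2 bs2 h2 _ (some 0) (by simp)]
        simp [PySem.List.pyGetD, PySem.List.pyGet?, PySem.List.pyIdx?, pvHeaders]
    | cons b1 bs1 =>
      rw [pv_scan_block 1 b1 bs1 h1 _ (some 0) (by simp)]
      cases F2 with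
      | nil =>
        simp [PySem.List.pyGetD, PySem.List.pyGet?, PySem.List.pyIdx?, pvHeaders]
      | cons b2 bs2 =>
        rw [pv_scan_block 2 b2 bs2 h2 _ (some 1) (by simp)]
        simp [PySem.List.pyGetD, PySem.List.pyGet?, PySem.List.pyIdx?, pvHeaders]
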